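-- pv_equiv track=rewrite | github.com/stshrive/rM | doc_normalize.py | get_normalized_name
-- ===== SOURCE A (Python) =====
-- def get_normalized_name(name):
--     name = name.lower()
--     for c in ['-', '_', '[', ']']:
--         if c in name:
--             name = name.replace(c, ' ')
--
--     name = name.strip()
--     name = '_'.join(name.split())
--     return name
-- ===== SOURCE B (Python) =====
-- def get_normalized_name(name):
--     parts = []
--     buf = []
--     for c in name.lower():
--         if c.isspace() or c in '-_[]':
--             if buf:
--                 parts.append(''.join(buf))
--                 buf = []
--         else:
--             buf.append(c)
--     if buf:
--         parts.append(''.join(buf))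
--     return '_'.join(parts)
-- ===== Notes on version B (the rewrite author's own statement) =====
-- stated objective: alternative
-- what changed: Replaces A's multi-pass pipeline (four conditional replace passes, strip, split, join) by a single character scan that flushes a token buffer at whitespace/separator boundaries.
import Mathlib
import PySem

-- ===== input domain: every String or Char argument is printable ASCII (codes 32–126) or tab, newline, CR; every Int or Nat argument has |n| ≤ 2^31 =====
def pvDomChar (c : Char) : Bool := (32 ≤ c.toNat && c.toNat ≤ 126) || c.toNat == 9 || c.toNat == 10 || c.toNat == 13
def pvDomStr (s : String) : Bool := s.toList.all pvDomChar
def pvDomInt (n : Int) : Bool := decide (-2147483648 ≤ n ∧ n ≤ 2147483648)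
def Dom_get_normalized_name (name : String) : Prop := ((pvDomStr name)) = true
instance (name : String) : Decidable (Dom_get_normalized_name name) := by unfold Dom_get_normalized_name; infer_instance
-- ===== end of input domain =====

-- B replaces A's multi-pass pipeline (four conditional replace passes, strip, split, join) by a
-- single character scan flushing a token buffer at whitespace/separator boundaries (alternative decomposition).

-- ===== PORT A =====
def get_normalized_name (name : String) : String :=
  let name := PySem.Str.lower name
  let name := (["-", "_", "[", "]"]).foldl
    (fun n c => if PySem.Str.isIn c n then PySem.Str.replace n c " " else n) name
  let name := PySem.Str.strip name
  PySem.Str.join "_" (PySem.Str.split₀ name)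

-- ===== PORT B =====
def pvBoundary (c : Char) : Bool :=
  PySem.Chars.isspace c || (c == '-' || c == '_' || c == '[' || c == ']')

def pvScan : List Char → List Char → List (List Char) → List (List Char)
  | [], buf, parts => if buf.isEmpty then parts else parts ++ [buf]
  | c :: rest, buf, parts =>
    if pvBoundary c then pvScan rest [] (if buf.isEmpty then parts else parts ++ [buf])
    else pvScan rest (buf ++ [c]) parts

def get_normalized_name_alt (name : String) : String :=
  String.ofList (PySem.Chars.join ['_'] (pvScan (PySem.Chars.lower name.toList) [] []))

-- ===== PRECONDITION & SPEC =====
def Spec_get_normalized_name (name : String) (out : String) : Prop := out = get_normalized_name_alt name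
instance (name : String) (out : String) : Decidable (Spec_get_normalized_name name out) := by unfold Spec_get_normalized_name; infer_instance

-- ===== CLAIM (what is proved, stated in full; the proofs are below) =====
def Claim_equal_get_normalized_name : Prop := ∀ (name : String), Dom_get_normalized_name name → Spec_get_normalized_name name (get_normalized_name name)

-- ===== LEMMAS AND PROOFS =====

-- the separator-to-space character map performed by A's replace loop
def pvSep (c : Char) : Bool := c == '-' || c == '_' || c == '[' || c == ']'
def pvF (c : Char) : Char := if pvSep c then ' ' else c

theorem pvReplaceGo_single (c d : Char) :
    ∀ (s acc : List Char) (fuel : Nat), s.length ≤ fuel →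
      PySem.Chars.replace.go [c] [d] fuel s acc
        = acc.reverse ++ s.map (fun x => if x == c then d else x) := by
  intro s
  induction s with
  | nil =>
    intro acc fuel _
    cases fuel <;> rw [PySem.Chars.replace.go] <;> simp
  | cons x t ih =>
    intro acc fuel hfuel
    cases fuel with
    | zero => simp at hfuel
    | succ m =>
      rw [PySem.Chars.replace.go]
      by_cases hx : c = x
      · subst hx
        rw [if_pos (by simp [List.isPrefixOf])]
        rw [show List.drop [c].length (c :: t) = t by simp]
        rw [ih ([d].reverse ++ acc) m (by simp at hfuel; omega)]
        simp
      · have hne : (x == c) = false := beq_eq_false_iff_ne.mpr (Ne.symm hx)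
        rw [if_neg (by simp [List.isPrefixOf, hx])]
        rw [ih (x :: acc) m (by simp at hfuel; omega)]
        simp only [List.map_cons, List.reverse_cons]
        rw [hne]
        simp

theorem pvReplace_single (c d : Char) (s : List Char) :
    PySem.Chars.replace s [c] [d] = s.map (fun x => if x == c then d else x) := by
  rw [PySem.Chars.replace]
  simp [pvReplaceGo_single c d s [] s.length le_rfl]

-- guarded replace step = unconditional character map
theorem pvStep_map (c d : Char) (s : List Char) :
    (if PySem.Chars.isIn [c] s then PySem.Chars.replace s [c] [d] else s)
      = s.map (fun x => if x == c then d else x) := by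
  by_cases h : PySem.Chars.isIn [c] s = true
  · rw [if_pos h, pvReplace_single]
  · rw [if_neg h]
    have hni : ¬ [c] <:+: s := fun hinf => h ((PySem.Chars.isIn_iff_infix [c] s).mpr hinf)
    have hmem : c ∉ s := by
      intro hc
      obtain ⟨l1, l2, rfl⟩ := List.append_of_mem hc
      exact hni ⟨l1, l2, by simp⟩
    have hpt : ∀ x ∈ s, (if x == c then d else x) = x := by
      intro x hx
      have : (x == c) = false := by
        simp only [beq_eq_false_iff_ne, ne_eq]
        exact fun hxc => hmem (hxc ▸ hx)
      simp [this]
    rw [List.map_congr_left hpt]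
    simp

-- split₀.go equations packaged
theorem pvGo_cons (c : Char) (rest cur : List Char) (acc : List (List Char)) :
    PySem.Chars.split₀.go (c :: rest) cur acc =
      (if PySem.Chars.isspace c then (if cur.isEmpty then PySem.Chars.split₀.go rest [] acc else PySem.Chars.split₀.go rest [] (cur.reverse :: acc))
       else PySem.Chars.split₀.go rest (c :: cur) acc) := by
  rw [PySem.Chars.split₀.go]

theorem pvGo_nil (cur : List Char) (acc : List (List Char)) :
    PySem.Chars.split₀.go [] cur acc = (if cur.isEmpty then acc.reverse else (cur.reverse :: acc).reverse) := by
  rw [PySem.Chars.split₀.go]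

theorem pvBoundary_eq_isspaceF (c : Char) : pvBoundary c = PySem.Chars.isspace (pvF c) := by
  by_cases hs : pvSep c = true
  · have hf : pvF c = ' ' := by simp [pvF, hs]
    rw [hf]
    unfold pvBoundary
    unfold pvSep at hs
    rw [hs]
    simp
    decide
  · have hs' : pvSep c = false := by simpa using hs
    have hf : pvF c = c := by simp [pvF, hs']
    rw [hf]
    unfold pvBoundary
    unfold pvSep at hs'
    rw [hs']
    simp

theorem pvF_of_not_boundary (c : Char) (h : pvBoundary c = false) : pvF c = c := by
  have hs' : pvSep c = false := by
    unfold pvBoundary at h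
    unfold pvSep
    rcases Bool.or_eq_false_iff.mp h with ⟨_, h2⟩
    exact h2
  simp [pvF, hs']

-- B's scan is split₀ of the separator-mapped list
theorem pvScan_go : ∀ (l buf : List Char) (parts : List (List Char)),
    pvScan l buf parts = PySem.Chars.split₀.go (l.map pvF) buf.reverse parts.reverse := by
  intro l
  induction l with
  | nil =>
    intro buf parts
    rw [pvScan]
    simp only [List.map_nil]
    rw [pvGo_nil]
    rcases eq_or_ne buf [] with he | he
    · subst he; simp
    · have h1 : buf.isEmpty = false := by simp [he]
      have h2 : buf.reverse.isEmpty = false := by simp [he]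
      simp [h1, h2]
  | cons c rest ih =>
    intro buf parts
    rw [pvScan]
    simp only [List.map_cons]
    rw [pvGo_cons, ← pvBoundary_eq_isspaceF]
    by_cases hb : pvBoundary c = true
    · rw [if_pos hb, if_pos hb]
      rcases eq_or_ne buf [] with he | he
      · subst he; simp [ih]
      · rw [ih]
        have h1 : buf.isEmpty = false := by simp [he]
        have h2 : buf.reverse.isEmpty = false := by simp [he]
        simp [h1, h2]
    · have hb' : pvBoundary c = false := by simpa using hb
      rw [if_neg hb, if_neg hb, pvF_of_not_boundary c hb', ih]
      simp

theorem pvScan_split₀ (l : List Char) :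
    pvScan l [] [] = PySem.Chars.split₀ (l.map pvF) := by
  rw [pvScan_go]; rfl

-- split₀ ignores leading whitespace
theorem pvSplit₀_lstrip (t : List Char) :
    PySem.Chars.split₀ (PySem.Chars.lstrip t) = PySem.Chars.split₀ t := by
  unfold PySem.Chars.split₀ PySem.Chars.lstrip
  induction t with
  | nil => rfl
  | cons c rest ih =>
    by_cases h : PySem.Chars.isspace c = true
    · rw [List.dropWhile_cons_of_pos h, ih, pvGo_cons, if_pos h]
      simp
    · rw [List.dropWhile_cons_of_neg (by simpa using h)]

-- trailing whitespace is ignored by split₀.go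
theorem pvGo_all_spaces : ∀ (sp : List Char), (∀ c ∈ sp, PySem.Chars.isspace c) →
    ∀ (cur : List Char) (acc : List (List Char)),
    PySem.Chars.split₀.go sp cur acc = PySem.Chars.split₀.go [] cur acc := by
  intro sp
  induction sp with
  | nil => intro _ _ _; rfl
  | cons d sp' ih =>
    intro h cur acc
    rw [pvGo_cons, if_pos (h d (by simp))]
    have ih' := ih (fun c hc => h c (by simp [hc]))
    by_cases hc : cur.isEmpty = true
    · rw [if_pos hc, ih', pvGo_nil, pvGo_nil, if_pos hc]
      simp
    · rw [if_neg hc, ih', pvGo_nil, pvGo_nil, if_neg hc]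
      simp

theorem pvGo_append_spaces : ∀ (t sp cur : List Char) (acc : List (List Char)),
    (∀ c ∈ sp, PySem.Chars.isspace c) →
    PySem.Chars.split₀.go (t ++ sp) cur acc = PySem.Chars.split₀.go t cur acc := by
  intro t
  induction t with
  | nil =>
    intro sp cur acc h
    simpa using pvGo_all_spaces sp h cur acc
  | cons c t' ih =>
    intro sp cur acc h
    rw [List.cons_append, pvGo_cons, pvGo_cons]
    by_cases hs : PySem.Chars.isspace c = true
    · rw [if_pos hs, if_pos hs]
      by_cases hc : cur.isEmpty = true
      · rw [if_pos hc, if_pos hc, ih sp _ _ h]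
      · rw [if_neg hc, if_neg hc, ih sp _ _ h]
    · rw [if_neg hs, if_neg hs, ih sp _ _ h]

theorem pvSplit₀_rstrip (t : List Char) :
    PySem.Chars.split₀ (PySem.Chars.rstrip t) = PySem.Chars.split₀ t := by
  have hdecomp : t = PySem.Chars.rstrip t ++ (List.takeWhile PySem.Chars.isspace t.reverse).reverse := by
    unfold PySem.Chars.rstrip
    conv_lhs => rw [← List.reverse_reverse t,
      ← List.takeWhile_append_dropWhile (p := PySem.Chars.isspace) (l := t.reverse)]
    rw [List.reverse_append]
  conv_rhs => rw [hdecomp]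
  unfold PySem.Chars.split₀
  rw [pvGo_append_spaces]
  intro c hc
  exact List.mem_takeWhile_imp (List.mem_reverse.mp hc)

theorem pvSplit₀_strip (t : List Char) :
    PySem.Chars.split₀ (PySem.Chars.strip t) = PySem.Chars.split₀ t := by
  rw [PySem.Chars.strip, pvSplit₀_rstrip, pvSplit₀_lstrip]

-- one guarded replace step of A, on the string level
theorem pvStepStr (cs : String) (ch : Char) (hcs : cs.toList = [ch]) (n : String) :
    (if PySem.Str.isIn cs n then PySem.Str.replace n cs " " else n).toList
      = n.toList.map (fun x => if x == ch then ' ' else x) := by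
  rw [apply_ite String.toList]
  have h1 : (PySem.Str.replace n cs " ").toList = PySem.Chars.replace n.toList cs.toList " ".toList := by simp
  have h2 : PySem.Str.isIn cs n = PySem.Chars.isIn cs.toList n.toList := by simp
  rw [h1, h2, hcs, show " ".toList = [' '] from rfl]
  exact pvStep_map ch ' ' n.toList

-- the four successive character maps collapse to pvF
theorem pvMaps_collapse (l : List Char) :
    ((((l.map (fun x => if x == '-' then ' ' else x)).map
        (fun x => if x == '_' then ' ' else x)).map
        (fun x => if x == '[' then ' ' else x)).map
        (fun x => if x == ']' then ' ' else x)) = l.map pvF := by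
  simp only [List.map_map]
  apply List.map_congr_left
  intro x _
  simp only [Function.comp]
  by_cases h1 : x = '-'
  · subst h1; decide
  by_cases h2 : x = '_'
  · subst h2; decide
  by_cases h3 : x = '['
  · subst h3; decide
  by_cases h4 : x = ']'
  · subst h4; decide
  simp [pvF, pvSep, h1, h2, h3, h4]

-- ===== VERDICT (by name: the statement is the Claim_ definition above) =====
theorem get_normalized_name_spec : Claim_equal_get_normalized_name := by
  intro name _
  unfold Spec_get_normalized_name get_normalized_name get_normalized_name_alt
  apply String.toList_inj.mp
  simp only [List.foldl_cons, List.foldl_nil]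
  rw [String.toList_ofList]
  have hjoin : ∀ (X : String),
      (PySem.Str.join "_" (PySem.Str.split₀ X)).toList
        = PySem.Chars.join ['_'] (PySem.Chars.split₀ X.toList) := by
    intro X; simp
  rw [hjoin]
  have hstrip : ∀ (Y : String), (PySem.Str.strip Y).toList = PySem.Chars.strip Y.toList := by
    intro Y; simp
  rw [hstrip]
  rw [pvStepStr "]" ']' rfl, pvStepStr "[" '[' rfl, pvStepStr "_" '_' rfl, pvStepStr "-" '-' rfl]
  have hlower : (PySem.Str.lower name).toList = PySem.Chars.lower name.toList := by simp
  rw [hlower, pvMaps_collapse, pvSplit₀_strip, pvScan_split₀]
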